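-- pv_equiv track=rewrite | github.com/veda1807/Second-year-CP | isAdditivePrime/isAdditivePrime.py | isAdditivePrime
-- ===== SOURCE A (Python) =====
-- def prime(n):
--     if n==2 or n==3:
--         return True
--     if(n<2 or n%2==0):
--         return False
--     if(n>3):
--         for i in range(3,n):
--             if(n%i==0):
--                 return False
--         return True
--
-- def isAdditivePrime(n):
--     sum=0
--     while(n>9):
--         n=str(n)
--         for i in n:
--             sum=sum+int(i)
--         n=sum
--         sum=0
--     else:
--         if(prime(n)):
--             return True
--         return False
-- ===== SOURCE B (Python) =====
-- def isAdditivePrime(n):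
--     if n > 9:
--         n = 1 + (n - 1) % 9  # closed-form digital root
--     return n in (2, 3, 5, 7)
-- ===== Notes on version B (the rewrite author's own statement) =====
-- stated objective: simpler
-- what changed: The iterated str()-based digit-sum while-loop plus the trial-division prime helper are replaced by the closed-form digital root 1 + (n-1) % 9 and a direct membership test against the primes not exceeding 9 (2, 3, 5, 7).
import Mathlib
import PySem

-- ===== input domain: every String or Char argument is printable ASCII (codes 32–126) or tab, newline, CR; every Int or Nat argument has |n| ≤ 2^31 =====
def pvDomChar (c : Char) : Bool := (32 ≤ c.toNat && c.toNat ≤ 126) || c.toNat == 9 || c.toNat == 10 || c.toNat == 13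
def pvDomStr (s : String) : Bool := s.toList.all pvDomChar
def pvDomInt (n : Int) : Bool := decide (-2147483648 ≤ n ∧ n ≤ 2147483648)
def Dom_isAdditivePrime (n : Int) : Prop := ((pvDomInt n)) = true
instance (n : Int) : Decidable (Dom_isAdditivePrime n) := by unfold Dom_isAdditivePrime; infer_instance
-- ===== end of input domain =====

-- B replaces A's iterated str()-digit-sum while-loop by the closed-form digital root
-- `1 + (n-1) % 9` and A's trial-division `prime` helper by a membership test against
-- the primes ≤ 9 (objective: simpler).

-- ===== PORT A =====
-- `int(i)` for one character i of str(n) (i is always a decimal digit here, so the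
-- `getD 0` default of the exact primitive is never taken)
def pvDigitInt (c : Char) : Int := (PySem.Int.ofChars? [c]).getD 0

-- one pass of A's while-body: `n=str(n); for i in n: sum=sum+int(i)` starting from sum=0
def pvDigitSum (n : Int) : Int := (PySem.Int.toChars n).foldl (fun s c => s + pvDigitInt c) 0

-- A's helper `prime`; the final `else false` is Python's implicit `return None`,
-- unreachable for every integer argument (an odd n with 1 < n ≤ 3 is n = 3, caught above)
def primeA (n : Int) : Bool :=
  if n == 2 || n == 3 then true
  else if n < 2 || PySem.Int.mod n 2 == 0 then false
  else if n > 3 then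
    -- `for i in range(3,n): if n%i==0: return False` then `return True`
    if (PySem.List.pyRange 3 n 1).any (fun i => PySem.Int.mod n i == 0) then false else true
  else false

-- ── termination facts for A's while-loop (cited by `decreasing_by` below) ──
theorem pvDigitInt_digitChar (d : Nat) (h : d < 10) : pvDigitInt (Nat.digitChar d) = (d : Int) := by
  interval_cases d <;> rfl

theorem pvToDigitsCore_sum (f : Nat) : ∀ (n : Nat) (acc : List Char), n < f →
    ((Nat.toDigitsCore 10 f n acc).map pvDigitInt).sum
      = ((Nat.digits 10 n).sum : Int) + (acc.map pvDigitInt).sum := by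
  induction f with
  | zero => intro n acc h; omega
  | succ f ih =>
    intro n acc h
    by_cases h0 : n / 10 = 0
    · have hn : n < 10 := by omega
      have hd : ((Nat.digits 10 n).sum : Int) = (n : Int) := by
        rcases Nat.eq_zero_or_pos n with h1 | h1
        · subst h1; simp
        · rw [Nat.digits_def' (by norm_num : (1:Nat) < 10) h1,
            show Nat.digits 10 (n / 10) = [] by rw [h0]; simp]
          simp [Nat.mod_eq_of_lt hn]
      simp only [Nat.toDigitsCore, h0, if_true, List.map_cons, List.sum_cons]
      rw [pvDigitInt_digitChar (n % 10) (Nat.mod_lt _ (by norm_num)), Nat.mod_eq_of_lt hn, hd]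
    · have h1 : 0 < n := by omega
      have h2 : n / 10 < f := by
        have := Nat.div_lt_self h1 (by norm_num : 1 < 10); omega
      simp only [Nat.toDigitsCore, h0, if_false]
      rw [ih (n / 10) (Nat.digitChar (n % 10) :: acc) h2,
        Nat.digits_def' (by norm_num : (1:Nat) < 10) h1]
      simp only [List.map_cons, List.sum_cons, List.sum_cons]
      rw [pvDigitInt_digitChar (n % 10) (Nat.mod_lt _ (by norm_num))]
      push_cast; ring

theorem pvDigitSum_eq (n : Int) (h : 0 ≤ n) :
    pvDigitSum n = ((Nat.digits 10 n.toNat).sum : Int) := by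
  unfold pvDigitSum
  rw [show PySem.Int.toChars n = Nat.toDigitsCore 10 (n.toNat + 1) n.toNat [] by
    simp [PySem.Int.toChars, show ¬ n < 0 by omega, Nat.toDigits]]
  rw [PySem.List.foldl_add, pvToDigitsCore_sum (n.toNat + 1) n.toNat [] (by omega)]
  simp

theorem pvDigitsSum_pos : ∀ (m : Nat), 0 < m → 0 < (Nat.digits 10 m).sum := by
  intro m
  induction m using Nat.strong_induction_on with
  | _ m ih =>
    intro hm
    rw [Nat.digits_def' (by norm_num : (1:Nat) < 10) hm, List.sum_cons]
    rcases Nat.eq_zero_or_pos (m % 10) with h | h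
    · have hd : 0 < m / 10 := by omega
      have := ih (m / 10) (Nat.div_lt_self hm (by norm_num)) hd
      omega
    · omega

theorem pvDigitSum_bounds (n : Int) (h : 9 < n) :
    1 ≤ pvDigitSum n ∧ pvDigitSum n < n ∧ pvDigitSum n % 9 = n % 9 := by
  have h0 : 0 ≤ n := by omega
  have hm : 10 ≤ n.toNat := by omega
  rw [pvDigitSum_eq n h0]
  have hsle : (Nat.digits 10 (n.toNat / 10)).sum ≤ n.toNat / 10 := Nat.digit_sum_le 10 _
  have hdef := Nat.digits_def' (by norm_num : (1:Nat) < 10) (show 0 < n.toNat by omega)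
  have hlt : (Nat.digits 10 n.toNat).sum < n.toNat := by
    rw [hdef, List.sum_cons]; omega
  have hpos := pvDigitsSum_pos n.toNat (by omega)
  have hmod : (Nat.digits 10 n.toNat).sum % 9 = n.toNat % 9 :=
    (Nat.modEq_nine_digits_sum n.toNat).symm
  have hcast : ((n.toNat : Int)) = n := Int.toNat_of_nonneg h0
  refine ⟨by omega, by omega, ?_⟩
  have : ((Nat.digits 10 n.toNat).sum : Int) % 9 = ((n.toNat : Int)) % 9 := by
    omega
  omega

-- the while-loop of A: repeat the digit-sum pass while n > 9, then fall through to
-- `if prime(n): return True` / `return False`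
def isAdditivePrimeLoop (n : Int) : Bool :=
  if h : 9 < n then isAdditivePrimeLoop (pvDigitSum n)
  else if primeA n then true else false
termination_by n.toNat
decreasing_by
  have := pvDigitSum_bounds n h
  omega

def isAdditivePrime (n : Int) : Bool := isAdditivePrimeLoop n

-- ===== PORT B =====
def isAdditivePrime_alt (n : Int) : Bool :=
  let m := if n > 9 then 1 + PySem.Int.mod (n - 1) 9 else n
  m == 2 || m == 3 || m == 5 || m == 7

-- ===== PRECONDITION & SPEC =====
def Spec_isAdditivePrime (n : Int) (out : Bool) : Prop := out = isAdditivePrime_alt n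
instance (n : Int) (out : Bool) : Decidable (Spec_isAdditivePrime n out) := by unfold Spec_isAdditivePrime; infer_instance

-- ===== CLAIM (what is proved, stated in full; the proofs are below) =====
def Claim_equal_isAdditivePrime : Prop := ∀ (n : Int), Dom_isAdditivePrime n → Spec_isAdditivePrime n (isAdditivePrime n)

-- ===== LEMMAS AND PROOFS =====

-- A's primality test agrees with B's membership test on every integer ≤ 9
theorem primeA_eq_mem (m : Int) (h : m ≤ 9) :
    (if primeA m then true else false) = (m == 2 || m == 3 || m == 5 || m == 7) := by
  by_cases h2 : m < 2
  · have e2 : (m == 2) = false := by simp; omega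
    have e3 : (m == 3) = false := by simp; omega
    have e5 : (m == 5) = false := by simp; omega
    have e7 : (m == 7) = false := by simp; omega
    simp [primeA, e2, e3, e5, e7, h2]
  · interval_cases m <;> decide

-- replacing n by its digit sum does not change B's answer (both sides reduce to the
-- same residue mod 9)
theorem alt_digitSum (n : Int) (h : 9 < n) :
    isAdditivePrime_alt (pvDigitSum n) = isAdditivePrime_alt n := by
  obtain ⟨h1, h2, h3⟩ := pvDigitSum_bounds n h
  set d := pvDigitSum n with hd
  have h9 : PySem.Int.mod (n - 1) 9 = (n - 1) % 9 := PySem.Int.mod_eq_emod_of_pos (by norm_num)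
  by_cases hgt : 9 < d
  · have h9' : PySem.Int.mod (d - 1) 9 = (d - 1) % 9 := PySem.Int.mod_eq_emod_of_pos (by norm_num)
    simp only [isAdditivePrime_alt, if_pos hgt, if_pos h, h9, h9']
    have : (d - 1) % 9 = (n - 1) % 9 := by omega
    rw [this]
  · simp only [isAdditivePrime_alt, if_neg hgt, if_pos h, h9]
    have : d = 1 + (n - 1) % 9 := by omega
    rw [this]

theorem loop_eq_alt : ∀ (k : Nat) (n : Int), n.toNat ≤ k →
    isAdditivePrimeLoop n = isAdditivePrime_alt n := by
  intro k
  induction k with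
  | zero =>
    intro n hn
    have h : ¬ 9 < n := by omega
    rw [isAdditivePrimeLoop, dif_neg h, primeA_eq_mem n (by omega)]
    simp only [isAdditivePrime_alt, if_neg h]
  | succ k ih =>
    intro n hn
    by_cases h : 9 < n
    · obtain ⟨h1, h2, _⟩ := pvDigitSum_bounds n h
      rw [isAdditivePrimeLoop, dif_pos h, ih (pvDigitSum n) (by omega), alt_digitSum n h]
    · rw [isAdditivePrimeLoop, dif_neg h, primeA_eq_mem n (by omega)]
      simp only [isAdditivePrime_alt, if_neg h]

-- ===== VERDICT (by name: the statement is the Claim_ definition above) =====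
theorem isAdditivePrime_spec : Claim_equal_isAdditivePrime := by
  intro n _
  unfold Spec_isAdditivePrime isAdditivePrime
  exact loop_eq_alt n.toNat n (le_refl _)
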